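-- pv_equiv track=rewrite | github.com/mcabio/study-guide-week-2 | practice.py | get_sum_zero_pairs
-- ===== SOURCE A (Python) =====
-- def get_sum_zero_pairs(numbers):
--     """Given list of numbers, return list of pairs summing to 0.
--
--     Given a list of numbers, add up each individual pair of numbers.
--     Return a list of each pair of numbers that adds up to 0.
--
--     For example:
--
--         >>> sort_pairs( get_sum_zero_pairs([1, 2, 3, -2, -1]) )
--         [[-2, 2], [-1, 1]]
--
--         >>> sort_pairs( get_sum_zero_pairs([3, -3, 2, 1, -2, -1]) )
--         [[-3, 3], [-2, 2], [-1, 1]]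
--
--     This should always be a unique list, even if there are
--     duplicates in the input list:
--
--         >>> sort_pairs( get_sum_zero_pairs([1, 2, 3, -2, -1, 1, 1]) )
--         [[-2, 2], [-1, 1]]
--
--     Of course, if there are one or more zeros to pair together,
--     that's fine, too (even a single zero can pair with itself):
--
--         >>> sort_pairs( get_sum_zero_pairs([1, 3, -1, 1, 1, 0]) )
--         [[-1, 1], [0, 0]]
--     """
--
--     zero_pairs = []
--
--     # The code below won't work because it creates double pairs.
--     # Each double pair shows the positive and negative integer together,
--     # then the negative and positive integer next.
--     # This is the output: [(-5, 5), (5, -5), (2, -2), (-2, 2), (5, -5), (2, -2), (4, -4), (-4, 4)]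
--     # for num in numbers:
--     #     negative_nums = -num
--     #     if negative_nums in unique_nums:
--     #         zero_pairs.append((num, negative_nums))
--
--     # This will loop over the range of the length of the numbers set
--     for i in range(len(numbers)):
--         # This iterates over the indices starting from i + 1 to avoid counting pairs twice (which was a problem)
--         # In the previous for loop
--         for j in range(i + 1, len(numbers)):
--             num_i = list(numbers)[i]
--             num_j = list(numbers)[j]
--             if num_i + num_j == 0:
--                 pair = sorted([num_i, num_j])  # Sort the pair to ensure uniqueness
--                 if pair not in zero_pairs:
--                     zero_pairs.append(pair)
--
--     # I kept getting a test failure because the zero was not adding another zero. This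
--     # for loop was the solution
--     for num in numbers:
--         if num == 0:
--             zero_pairs.append([0, 0])
--
--     return zero_pairs
-- ===== SOURCE B (Python) =====
-- def get_sum_zero_pairs(numbers):
--     """Two linear passes instead of nested scans: a right-to-left pass records,
--     for each position, whether its negation occurs later; a left-to-right pass
--     emits each pair at its first discovery position, deduplicating with a set."""
--     flags = []
--     seen_after = set()
--     for n in reversed(numbers):
--         flags.append(-n in seen_after)
--         seen_after.add(n)
--     flags.reverse()
--
--     pairs = []
--     seen = set()
--     zeros = 0
--     for n, later in zip(numbers, flags):
--         if n == 0:
--             zeros += 1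
--         if later:
--             key = (n, -n) if n <= -n else (-n, n)
--             if key not in seen:
--                 seen.add(key)
--                 pairs.append([key[0], key[1]])
--     return pairs + [[0, 0]] * zeros
-- ===== Notes on version B (the rewrite author's own statement) =====
-- stated objective: faster
-- what changed: Replaces A's nested index loops (with an O(k) 'pair not in list' dedup and re-sorting each candidate pair) and its separate zero pass by two linear passes: a right-to-left pass recording for each position whether its negation occurs later, then one left-to-right pass that emits each pair at its first discovery position using a seen-set and counts zeros in the same pass.
import Mathlib
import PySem

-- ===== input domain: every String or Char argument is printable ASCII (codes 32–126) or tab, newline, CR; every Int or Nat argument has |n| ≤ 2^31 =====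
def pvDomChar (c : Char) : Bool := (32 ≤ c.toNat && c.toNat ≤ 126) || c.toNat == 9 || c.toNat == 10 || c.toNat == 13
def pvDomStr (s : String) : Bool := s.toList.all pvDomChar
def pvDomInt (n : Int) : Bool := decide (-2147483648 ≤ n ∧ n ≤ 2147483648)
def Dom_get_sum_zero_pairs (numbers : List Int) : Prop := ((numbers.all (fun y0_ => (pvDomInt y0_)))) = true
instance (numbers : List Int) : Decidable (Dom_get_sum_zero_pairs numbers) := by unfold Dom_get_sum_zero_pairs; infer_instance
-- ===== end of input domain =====

-- B replaces A's nested index scans (with a list-membership dedup) by two linear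
-- passes: a right-to-left pass marking positions whose negation occurs later, then
-- one left-to-right pass with a seen-set; zeros are counted in the same pass.

-- ===== PORT A =====
def get_sum_zero_pairs (numbers : List Int) : List (List Int) :=
  let zero_pairs : List (List Int) :=
    (PySem.List.pyRange 0 (numbers.length : Int)).foldl (fun acc i =>
      (PySem.List.pyRange (i + 1) (numbers.length : Int)).foldl (fun acc j =>
        let num_i := PySem.List.pyGetD numbers i 0
        let num_j := PySem.List.pyGetD numbers j 0
        if num_i + num_j == 0 then
          let pair := PySem.List.sorted [num_i, num_j] (fun x => x) false
          if !(acc.contains pair) then acc ++ [pair] else acc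
        else acc) acc) []
  numbers.foldl (fun acc num => if num == 0 then acc ++ [[0, 0]] else acc) zero_pairs

-- ===== PORT B =====
def get_sum_zero_pairs_alt (numbers : List Int) : List (List Int) :=
  let fs : List Bool × PySem.Set Int :=
    numbers.reverse.foldl
      (fun st n => (st.1 ++ [PySem.Set.contains st.2 (-n)], PySem.Set.add st.2 n))
      ([], PySem.Set.empty)
  let flags : List Bool := fs.1.reverse
  let res : List (List Int) × PySem.Set (Int × Int) × Int :=
    (numbers.zip flags).foldl
      (fun st p =>
        let n := p.1
        let zeros := if n == 0 then st.2.2 + 1 else st.2.2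
        if p.2 then
          let key : Int × Int := if n ≤ -n then (n, -n) else (-n, n)
          if !(PySem.Set.contains st.2.1 key) then
            (st.1 ++ [[key.1, key.2]], PySem.Set.add st.2.1 key, zeros)
          else (st.1, st.2.1, zeros)
        else (st.1, st.2.1, zeros))
      ([], PySem.Set.empty, 0)
  res.1 ++ PySem.List.pyRepeat [[0, 0]] res.2.2

-- ===== PRECONDITION & SPEC =====
def Spec_get_sum_zero_pairs (numbers : List Int) (out : List (List Int)) : Prop := out = get_sum_zero_pairs_alt numbers
instance (numbers : List Int) (out : List (List Int)) : Decidable (Spec_get_sum_zero_pairs numbers out) := by unfold Spec_get_sum_zero_pairs; infer_instance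

-- ===== CLAIM (what is proved, stated in full; the proofs are below) =====
def Claim_equal_get_sum_zero_pairs : Prop := ∀ (numbers : List Int), Dom_get_sum_zero_pairs numbers → Spec_get_sum_zero_pairs numbers (get_sum_zero_pairs numbers)

-- ===== LEMMAS AND PROOFS =====

def pvKey (v : Int) : Int × Int := if v ≤ -v then (v, -v) else (-v, v)
def pvPair (v : Int) : List Int := [(pvKey v).1, (pvKey v).2]

theorem pvSorted_pair (v : Int) : PySem.List.sorted [v, -v] (fun x => x) false = pvPair v := by
  by_cases h : v ≤ -v
  · simp [PySem.List.sorted, PySem.List.insertBy, pvPair, pvKey, h, not_lt.2 h]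
  · have h' : -v < v := by omega
    simp [PySem.List.sorted, PySem.List.insertBy, pvPair, pvKey, h, h']

theorem pvPair_eq_iff (w x : Int) : pvPair w = pvPair x ↔ pvKey w = pvKey x := by
  simp [pvPair, Prod.ext_iff]

theorem pvInnerChar (v : Int) (ys : List Int) (acc : List (List Int)) :
    ys.foldl (fun acc num_j =>
      if v + num_j == 0 then
        let pair := PySem.List.sorted [v, num_j] (fun x => x) false
        if !(acc.contains pair) then acc ++ [pair] else acc
      else acc) acc
    = if (-v) ∈ ys ∧ pvPair v ∉ acc then acc ++ [pvPair v] else acc := by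
  induction ys generalizing acc with
  | nil => simp
  | cons y t ih =>
    simp only [List.foldl_cons]
    rw [ih]
    by_cases hy : y = -v
    · subst hy
      simp only [show (v + -v == 0) = true by simp, if_true, pvSorted_pair,
        List.contains_eq_mem]
      by_cases hmem : pvPair v ∈ acc
      · simp [hmem]
      · simp [hmem]
    · have hne : -v ≠ y := fun h => hy h.symm
      simp only [show (v + y == 0) = false by simp; omega, Bool.false_eq_true, if_false]
      simp [List.mem_cons, hne]

def pvCore : List Int → List (List Int) → List (List Int)
  | [], acc => acc
  | x :: t, acc => pvCore t (if (-x) ∈ t ∧ pvPair x ∉ acc then acc ++ [pvPair x] else acc)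

theorem pvPassA (xs : List Int) : ∀ (m k : Nat), xs.length - k = m → ∀ (acc : List (List Int)),
    (PySem.List.pyRange (k : Int) (xs.length : Int)).foldl (fun acc i =>
      (PySem.List.pyRange (i + 1) (xs.length : Int)).foldl (fun acc j =>
        let num_i := PySem.List.pyGetD xs i 0
        let num_j := PySem.List.pyGetD xs j 0
        if num_i + num_j == 0 then
          let pair := PySem.List.sorted [num_i, num_j] (fun x => x) false
          if !(acc.contains pair) then acc ++ [pair] else acc
        else acc) acc) acc
    = pvCore (xs.drop k) acc := by
  intro m
  induction m with
  | zero =>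
    intro k hk acc
    rw [PySem.List.pyRange_one_eq_nil (by omega), List.drop_of_length_le (by omega)]
    rfl
  | succ m ih =>
    intro k hk acc
    have hklt : k < xs.length := by omega
    rw [PySem.List.pyRange_one_cons (by exact_mod_cast hklt), List.foldl_cons]
    rw [PySem.List.foldl_pyRange_pyGetD' xs 0
      (f := fun acc num_j =>
        let num_i := PySem.List.pyGetD xs (k : Int) 0
        if num_i + num_j == 0 then
          let pair := PySem.List.sorted [num_i, num_j] (fun x => x) false
          if !(acc.contains pair) then acc ++ [pair] else acc
        else acc) (init := acc) (by omega)]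
    have htn : ((k : Int) + 1).toNat = k + 1 := by omega
    rw [htn]
    have hget : PySem.List.pyGetD xs (k : Int) 0 = xs[k] := by
      rw [PySem.List.pyGetD_natCast, List.getD_eq_getElem xs 0 hklt]
    simp only [hget]
    rw [pvInnerChar xs[k] (xs.drop (k+1)) acc]
    rw [List.drop_eq_getElem_cons hklt]
    show _ = pvCore (xs.drop (k+1)) _
    rw [← ih (k+1) (by omega)]
    rfl
theorem pvA_eq (xs : List Int) :
    get_sum_zero_pairs xs = pvCore xs [] ++ List.replicate (xs.count 0) [0, 0] := by
  have hz := pvPassA xs xs.length 0 rfl []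
  simp only [Nat.cast_zero, List.drop_zero] at hz
  simp only [get_sum_zero_pairs]
  rw [hz, PySem.List.foldl_append_if (p := fun num => num == 0) (f := fun _ => ([0, 0] : List Int))]
  congr 1
  rw [List.map_const']
  congr 1
  exact Eq.symm List.count_eq_length_filter

def pvFlags : List Int → List Bool
  | [] => []
  | x :: t => decide ((-x) ∈ t) :: pvFlags t

theorem pvPass1_snd (ys : List Int) : ∀ (fl : List Bool) (s : PySem.Set Int),
    ((ys.foldl
      (fun st n => (st.1 ++ [PySem.Set.contains st.2 (-n)], PySem.Set.add st.2 n))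
      (fl, s)).2) = PySem.Set.update s ys := by
  induction ys with
  | nil => intro fl s; rfl
  | cons y t ih =>
    intro fl s
    rw [List.foldl_cons]
    rw [ih]
    rfl

theorem pvPass1 (xs : List Int) :
    ((xs.reverse.foldl
      (fun st n => (st.1 ++ [PySem.Set.contains st.2 (-n)], PySem.Set.add st.2 n))
      (([], PySem.Set.empty) : List Bool × PySem.Set Int)).1).reverse = pvFlags xs := by
  induction xs with
  | nil => rfl
  | cons x t ih =>
    rw [List.reverse_cons, List.foldl_append, List.foldl_cons, List.foldl_nil]
    have hsnd := pvPass1_snd t.reverse ([] : List Bool) (PySem.Set.empty : PySem.Set Int)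
    show ((t.reverse.foldl _ ([], PySem.Set.empty)).1 ++
      [PySem.Set.contains (t.reverse.foldl _ ([], PySem.Set.empty)).2 (-x)]).reverse = _
    rw [List.reverse_append, hsnd]
    have hc : PySem.Set.contains (PySem.Set.update (PySem.Set.empty : PySem.Set Int) t.reverse) (-x)
        = decide ((-x) ∈ t) := by
      by_cases hm : (-x) ∈ t
      · rw [decide_eq_true hm]
        exact (PySem.Set.contains_iff _ _).2 ((PySem.Set.mem_update _ _ _).2 (Or.inr (by simpa using hm)))
      · rw [decide_eq_false hm]
        rw [← Bool.not_eq_true]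
        intro hcon
        rcases (PySem.Set.mem_update _ _ _).1 ((PySem.Set.contains_iff _ _).1 hcon) with h | h
        · simp [PySem.Set.empty] at h
        · exact hm (by simpa using h)
    rw [hc, ih]
    rfl

theorem pvKey_mem_iff (x : Int) (ws : List Int) :
    pvKey x ∈ ws.map pvKey ↔ pvPair x ∈ ws.map pvPair := by
  simp only [List.mem_map]
  constructor
  · rintro ⟨w, hw, h⟩; exact ⟨w, hw, (pvPair_eq_iff w x).2 h⟩
  · rintro ⟨w, hw, h⟩; exact ⟨w, hw, (pvPair_eq_iff w x).1 h⟩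

theorem pvAdd_not_contains {α : Type} [BEq α] (s : PySem.Set α) (x : α)
    (h : PySem.Set.contains s x = false) : PySem.Set.add s x = s ++ [x] := by
  simp only [PySem.Set.add]
  rw [show PySem.Set.contains s x = false from h]
  simp

theorem pvZeroStep (x z : Int) (r : List Int) :
    (if (x == 0) = true then z + 1 else z) + (r.count 0 : Int) = z + ((x :: r).count 0 : Int) := by
  by_cases hx : x = (0 : Int)
  · subst hx; simp; ring
  · simp [hx]

theorem pvPass2 (t : List Int) : ∀ (ws : List Int) (z : Int), ∃ ws' : List Int,
    ((t.zip (pvFlags t)).foldl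
      (fun st p =>
        let n := p.1
        let zeros := if n == 0 then st.2.2 + 1 else st.2.2
        if p.2 then
          let key : Int × Int := if n ≤ -n then (n, -n) else (-n, n)
          if !(PySem.Set.contains st.2.1 key) then
            (st.1 ++ [[key.1, key.2]], PySem.Set.add st.2.1 key, zeros)
          else (st.1, st.2.1, zeros)
        else (st.1, st.2.1, zeros))
      ((ws.map pvPair, (ws.map pvKey : PySem.Set (Int × Int)), z) :
        List (List Int) × PySem.Set (Int × Int) × Int))
    = (ws'.map pvPair, (ws'.map pvKey : PySem.Set (Int × Int)), z + (t.count 0 : Int))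
    ∧ ws'.map pvPair = pvCore t (ws.map pvPair) := by
  induction t with
  | nil => intro ws z; exact ⟨ws, by simp, rfl⟩
  | cons x r ih =>
    intro ws z
    have hkey : (if x ≤ -x then (x, -x) else (-x, x)) = pvKey x := rfl
    show ∃ ws', (List.zip (x :: r) (decide ((-x) ∈ r) :: pvFlags r)).foldl _ _ = _ ∧ _
    rw [List.zip_cons_cons, List.foldl_cons]
    by_cases hmem : (-x) ∈ r
    · rw [decide_eq_true hmem]
      simp only [if_true, hkey]
      by_cases hseen : pvPair x ∈ ws.map pvPair
      · have hc : PySem.Set.contains (ws.map pvKey : PySem.Set (Int × Int)) (pvKey x) = true :=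
          (PySem.Set.contains_iff _ _).2 ((pvKey_mem_iff x ws).2 hseen)
        simp only [hc, Bool.not_true, Bool.false_eq_true, if_false]
        obtain ⟨ws', h1, h2⟩ := ih ws (if x == 0 then z + 1 else z)
        refine ⟨ws', ?_, ?_⟩
        · rw [h1]
          exact congrArg _ (congrArg _ (pvZeroStep x z r))
        · rw [h2]
          show _ = pvCore r (if (-x) ∈ r ∧ pvPair x ∉ ws.map pvPair then _ else _)
          rw [if_neg (by tauto)]
      · have hc : PySem.Set.contains (ws.map pvKey : PySem.Set (Int × Int)) (pvKey x) = false := by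
          rw [← Bool.not_eq_true]
          intro hcon
          exact hseen ((pvKey_mem_iff x ws).1 ((PySem.Set.contains_iff _ _).1 hcon))
        simp only [hc, Bool.not_false, if_true]
        rw [pvAdd_not_contains _ _ hc]
        have hmapp : (ws.map pvPair) ++ [[(pvKey x).1, (pvKey x).2]] = (ws ++ [x]).map pvPair := by
          simp [pvPair]
        have hmapk : (ws.map pvKey : PySem.Set (Int × Int)) ++ [pvKey x] = (ws ++ [x]).map pvKey := by
          simp
        rw [hmapp]
        obtain ⟨ws', h1, h2⟩ := ih (ws ++ [x]) (if x == 0 then z + 1 else z)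
        refine ⟨ws', ?_, ?_⟩
        · rw [← hmapk] at h1
          rw [h1]
          exact congrArg _ (congrArg _ (pvZeroStep x z r))
        · rw [h2]
          show _ = pvCore r (if (-x) ∈ r ∧ pvPair x ∉ ws.map pvPair then _ else _)
          rw [if_pos ⟨hmem, hseen⟩]
          simp [pvPair]
    · rw [decide_eq_false hmem]
      simp only [Bool.false_eq_true, if_false]
      obtain ⟨ws', h1, h2⟩ := ih ws (if x == 0 then z + 1 else z)
      refine ⟨ws', ?_, ?_⟩
      · rw [h1]
        exact congrArg _ (congrArg _ (pvZeroStep x z r))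
      · rw [h2]
        show _ = pvCore r (if (-x) ∈ r ∧ pvPair x ∉ ws.map pvPair then _ else _)
        rw [if_neg (by tauto)]
theorem pvB_eq (xs : List Int) :
    get_sum_zero_pairs_alt xs = pvCore xs [] ++ List.replicate (xs.count 0) [0, 0] := by
  simp only [get_sum_zero_pairs_alt]
  rw [pvPass1]
  obtain ⟨ws', h1, h2⟩ := pvPass2 xs [] 0
  simp only [List.map_nil, zero_add] at h1 h2
  rw [show (([], PySem.Set.empty, 0) : List (List Int) × PySem.Set (Int × Int) × Int)
      = (([], ([] : List (Int × Int)), 0) : List (List Int) × PySem.Set (Int × Int) × Int) from rfl]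
  rw [h1, h2]
  rw [PySem.List.pyRepeat_singleton]
  simp

-- ===== VERDICT (by name: the statement is the Claim_ definition above) =====
theorem get_sum_zero_pairs_spec : Claim_equal_get_sum_zero_pairs := by
  intro numbers _
  show get_sum_zero_pairs numbers = get_sum_zero_pairs_alt numbers
  rw [pvA_eq, pvB_eq]
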